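-- pv_equiv track=rewrite | github.com/appleseedlab/superc | fonda/cpp_testsuite/desugarer/microbenchmark/autorunner.py | printStatus
-- ===== SOURCE A (Python) =====
-- def printStatus(s):
--   st = ""
--   for a in s:
--     if ':: match' in a:
--       st += a + "\n"
--   for a in s:
--     if ':: match' not in a:
--       st += a + "\n"
--   return st
-- ===== SOURCE B (Python) =====
-- def printStatus(s):
--   matches = []
--   others = []
--   for a in s:
--     (matches if ':: match' in a else others).append(a)
--   return ''.join(a + '\n' for a in matches + others)
-- ===== Notes on version B (the rewrite author's own statement) =====
-- stated objective: simpler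
-- what changed: Single pass partitioning lines into two buckets, then one join, instead of two full scans of the input concatenating onto a string.
import Mathlib
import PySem

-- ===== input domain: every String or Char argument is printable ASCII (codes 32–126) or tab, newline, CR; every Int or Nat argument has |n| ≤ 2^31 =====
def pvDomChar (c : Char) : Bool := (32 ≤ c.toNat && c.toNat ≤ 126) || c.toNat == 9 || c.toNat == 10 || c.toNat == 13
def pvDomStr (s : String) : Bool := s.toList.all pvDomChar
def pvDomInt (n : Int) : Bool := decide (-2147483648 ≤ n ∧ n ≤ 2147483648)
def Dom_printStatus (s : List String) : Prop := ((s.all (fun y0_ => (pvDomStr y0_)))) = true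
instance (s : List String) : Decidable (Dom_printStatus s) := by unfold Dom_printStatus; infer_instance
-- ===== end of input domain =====

-- B replaces A's two scans of the list by a single pass into two buckets followed by one join (objective: simpler).

-- ===== PORT A =====
def printStatus (s : List String) : String :=
  let st := s.foldl (fun st a => if PySem.Str.isIn ":: match" a then st ++ (a ++ "\n") else st) ""
  s.foldl (fun st a => if !(PySem.Str.isIn ":: match" a) then st ++ (a ++ "\n") else st) st

-- ===== PORT B =====
def printStatus_alt (s : List String) : String :=
  let p := s.foldl
    (fun (mo : List String × List String) a =>
      if PySem.Str.isIn ":: match" a then (mo.1 ++ [a], mo.2) else (mo.1, mo.2 ++ [a]))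
    ([], [])
  PySem.Str.join "" ((p.1 ++ p.2).map (fun a => a ++ "\n"))

-- ===== PRECONDITION & SPEC =====
def Spec_printStatus (s : List String) (out : String) : Prop := out = printStatus_alt s
instance (s : List String) (out : String) : Decidable (Spec_printStatus s out) := by unfold Spec_printStatus; infer_instance

-- ===== CLAIM (what is proved, stated in full; the proofs are below) =====
def Claim_equal_printStatus : Prop := ∀ (s : List String), Dom_printStatus s → Spec_printStatus s (printStatus s)

-- ===== LEMMAS AND PROOFS =====

theorem pvJoin_nil : PySem.Str.join "" [] = "" := by
  simp [PySem.Str.join, PySem.Chars.join, List.intercalate]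

theorem pvJoin_cons (x : String) (rest : List String) :
    PySem.Str.join "" (x :: rest) = x ++ PySem.Str.join "" rest := by
  simp [PySem.Str.join, PySem.Chars.join, List.intercalate]
  cases rest <;> simp

theorem pvJoin_append (l₁ l₂ : List String) :
    PySem.Str.join "" (l₁ ++ l₂) = PySem.Str.join "" l₁ ++ PySem.Str.join "" l₂ := by
  induction l₁ with
  | nil => simp [pvJoin_nil]
  | cons x t ih => simp [pvJoin_cons, ih, String.append_assoc]

theorem pvFoldA (c : String → Bool) :
    ∀ (l : List String) (st : String),
      l.foldl (fun st a => if c a then st ++ (a ++ "\n") else st) st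
        = st ++ PySem.Str.join "" ((l.filter c).map (fun a => a ++ "\n")) := by
  intro l
  induction l with
  | nil => intro st; simp [pvJoin_nil]
  | cons a t ih =>
    intro st
    by_cases h : c a = true
    · simp [List.foldl_cons, h, ih, pvJoin_cons, String.append_assoc]
    · simp at h
      simp [List.foldl_cons, h, ih]

theorem pvFoldB :
    ∀ (l : List String) (ml ol : List String),
      l.foldl
        (fun (mo : List String × List String) a =>
          if PySem.Str.isIn ":: match" a then (mo.1 ++ [a], mo.2) else (mo.1, mo.2 ++ [a]))
        (ml, ol)
      = (ml ++ l.filter (fun a => PySem.Str.isIn ":: match" a),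
         ol ++ l.filter (fun a => !(PySem.Str.isIn ":: match" a))) := by
  intro l
  induction l with
  | nil => intro ml ol; simp
  | cons a t ih =>
    intro ml ol
    cases h : PySem.Str.isIn ":: match" a
    · simp [PySem.Str.isIn_eq] at h
      rw [List.foldl_cons, if_neg (by simp [h]), ih]
      simp [h]
    · simp [PySem.Str.isIn_eq] at h
      rw [List.foldl_cons, if_pos (by simp [h]), ih]
      simp [h]

-- ===== VERDICT (by name: the statement is the Claim_ definition above) =====
theorem printStatus_spec : Claim_equal_printStatus := by
  intro s _
  unfold Spec_printStatus printStatus printStatus_alt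
  rw [pvFoldB]
  simp only [List.nil_append, List.map_append, pvJoin_append,
    pvFoldA (fun a => PySem.Str.isIn ":: match" a),
    pvFoldA (fun a => !(PySem.Str.isIn ":: match" a))]
  simp
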